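-- pv_equiv track=rewrite | github.com/llass61/Learning_old | new-development/PowerFlowAnalysis/PowerFlowOptions.py | transPhase
-- ===== SOURCE A (Python) =====
-- def transPhase(ph):
--     p = ph.lower()
--     phase = 0
--     pc = 'abcn'  # can be improved by a loop over p not pc
--     for i in range(4):
--         if pc[i] in p:
--             phase += 2**i
--     return phase
-- ===== SOURCE B (Python) =====
-- def transPhase(ph):
--     bits = {'a': 1, 'b': 2, 'c': 4, 'n': 8}
--     phase = 0
--     for ch in ph.lower():
--         phase |= bits.get(ch, 0)
--     return phase
-- ===== Notes on version B (the rewrite author's own statement) =====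
-- stated objective: idiomatic
-- what changed: B replaces the fixed loop over the four phase letters with substring tests by a single pass over the input's characters, OR-ing each character's bit from a char-to-bit table (OR so repeats don't double-count).
import Mathlib
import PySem

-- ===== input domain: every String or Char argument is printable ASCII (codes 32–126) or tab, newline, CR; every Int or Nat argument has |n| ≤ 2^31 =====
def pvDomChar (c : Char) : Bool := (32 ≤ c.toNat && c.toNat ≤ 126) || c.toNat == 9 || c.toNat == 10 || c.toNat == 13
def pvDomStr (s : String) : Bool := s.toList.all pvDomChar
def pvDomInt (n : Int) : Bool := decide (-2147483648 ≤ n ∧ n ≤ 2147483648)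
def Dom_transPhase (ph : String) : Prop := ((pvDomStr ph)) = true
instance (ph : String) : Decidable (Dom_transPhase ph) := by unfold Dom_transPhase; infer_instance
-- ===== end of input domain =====

-- B: one pass over the input's characters OR-ing bits from a char→bit table,
-- instead of A's four substring tests over the fixed string 'abcn' (idiomatic; same cost).

-- ===== PORT A =====
def transPhase (ph : String) : Int :=
  let p := PySem.Str.lower ph
  let pc := "abcn"
  (PySem.List.pyRange 0 4 1).foldl
    (fun phase i =>
      match PySem.List.pyGet? pc.toList i with
      | some c => if PySem.Chars.isIn [c] p.toList then phase + 2 ^ i.toNat else phase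
      | none => phase) 0

-- ===== PORT B =====
def tpBits : PySem.Dict Char Int :=
  PySem.Dict.ofList [('a', 1), ('b', 2), ('c', 4), ('n', 8)]

def transPhase_alt (ph : String) : Int :=
  (PySem.Chars.lower ph.toList).foldl
    (fun phase ch => Int.lor phase (tpBits.getD ch 0)) 0

-- ===== PRECONDITION & SPEC =====
def Spec_transPhase (ph : String) (out : Int) : Prop := out = transPhase_alt ph
instance (ph : String) (out : Int) : Decidable (Spec_transPhase ph out) := by unfold Spec_transPhase; infer_instance

-- ===== CLAIM (what is proved, stated in full; the proofs are below) =====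
def Claim_equal_transPhase : Prop := ∀ (ph : String), Dom_transPhase ph → Spec_transPhase ph (transPhase ph)

-- ===== LEMMAS AND PROOFS =====

-- The value of the accumulator when exactly the flagged bits are set.
def tpV (a b c n : Bool) : Int :=
  (if a then 1 else 0) + (if b then 2 else 0) + (if c then 4 else 0) + (if n then 8 else 0)

theorem tpStep (ch : Char) (a b c n : Bool) :
    Int.lor (tpV a b c n) (tpBits.getD ch 0) =
      tpV (a || (ch == 'a')) (b || (ch == 'b')) (c || (ch == 'c')) (n || (ch == 'n')) := by
  by_cases h1 : ch = 'a'
  · subst h1; cases a <;> cases b <;> cases c <;> cases n <;> decide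
  by_cases h2 : ch = 'b'
  · subst h2; cases a <;> cases b <;> cases c <;> cases n <;> decide
  by_cases h3 : ch = 'c'
  · subst h3; cases a <;> cases b <;> cases c <;> cases n <;> decide
  by_cases h4 : ch = 'n'
  · subst h4; cases a <;> cases b <;> cases c <;> cases n <;> decide
  have hmk : tpBits = PySem.Dict.mk [('a', 1), ('b', 2), ('c', 4), ('n', 8)] := rfl
  have hbits : tpBits.getD ch 0 = 0 := by
    rw [hmk]
    simp [PySem.Dict.getD_eq_get?_getD, PySem.Dict.get?,
      Ne.symm h1, Ne.symm h2, Ne.symm h3, Ne.symm h4]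
  rw [hbits, show (ch == 'a') = false from beq_eq_false_iff_ne.mpr h1,
    show (ch == 'b') = false from beq_eq_false_iff_ne.mpr h2,
    show (ch == 'c') = false from beq_eq_false_iff_ne.mpr h3,
    show (ch == 'n') = false from beq_eq_false_iff_ne.mpr h4]
  simp only [Bool.or_false]
  cases a <;> cases b <;> cases c <;> cases n <;> decide

theorem tpFold (l : List Char) : ∀ a b c n : Bool,
    l.foldl (fun phase ch => Int.lor phase (tpBits.getD ch 0)) (tpV a b c n) =
      tpV (a || decide ('a' ∈ l)) (b || decide ('b' ∈ l))
          (c || decide ('c' ∈ l)) (n || decide ('n' ∈ l)) := by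
  induction l with
  | nil => intro a b c n; simp
  | cons ch t ih =>
    intro a b c n
    simp only [List.foldl_cons, tpStep, ih]
    congr 1 <;> (rw [Bool.eq_iff_iff]; simp; tauto)
    
theorem tpIsIn (c : Char) (L : List Char) :
    PySem.Chars.isIn [c] L = decide (c ∈ L) := by
  rw [Bool.eq_iff_iff]
  simp [PySem.Chars.isIn_iff_infix, List.singleton_infix_iff]

-- ===== VERDICT (by name: the statement is the Claim_ definition above) =====
theorem transPhase_spec : Claim_equal_transPhase := by
  unfold Claim_equal_transPhase Spec_transPhase
  intro ph _
  unfold transPhase transPhase_alt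
  simp only [PySem.Str.toList_lower]
  have hr : PySem.List.pyRange 0 4 1 = [0, 1, 2, 3] := by decide
  rw [hr]
  have hb : (PySem.Chars.lower ph.toList).foldl
      (fun phase ch => Int.lor phase (tpBits.getD ch 0)) 0 =
      tpV (decide ('a' ∈ (PySem.Chars.lower ph.toList))) (decide ('b' ∈ (PySem.Chars.lower ph.toList)))
          (decide ('c' ∈ (PySem.Chars.lower ph.toList))) (decide ('n' ∈ (PySem.Chars.lower ph.toList))) := by
    have h := tpFold (PySem.Chars.lower ph.toList) false false false false
    simpa [show tpV false false false false = 0 from rfl] using h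
  rw [hb]
  simp only [List.foldl_cons, List.foldl_nil,
    show PySem.List.pyGet? "abcn".toList 0 = some 'a' from by decide,
    show PySem.List.pyGet? "abcn".toList 1 = some 'b' from by decide,
    show PySem.List.pyGet? "abcn".toList 2 = some 'c' from by decide,
    show PySem.List.pyGet? "abcn".toList 3 = some 'n' from by decide,
    tpIsIn]
  by_cases h1 : 'a' ∈ PySem.Chars.lower ph.toList <;>
    by_cases h2 : 'b' ∈ PySem.Chars.lower ph.toList <;>
      by_cases h3 : 'c' ∈ PySem.Chars.lower ph.toList <;>
        by_cases h4 : 'n' ∈ PySem.Chars.lower ph.toList <;>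
          simp [h1, h2, h3, h4, tpV]
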